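-- pv_equiv track=rewrite | github.com/yushyn-andriy/algo | competitions/onlinejudge/ch2/linear/00414/p00414.py | get_total_void
-- ===== SOURCE A (Python) =====
-- def get_total_void(rows):
--     counts = []
--     for row in rows:
--         counts.append(row.count(' '))
--     min_void = min(counts)
--     total_void = 0
--     for c in counts:
--         if c > min_void:
--             total_void += c - min_void
--     return total_void
-- ===== SOURCE B (Python) =====
-- def get_total_void(rows):
--     # Single pass, no counts list: running minimum with retroactive correction.
--     m = rows[0].count(' ')
--     total = 0
--     for i, row in enumerate(rows):
--         c = row.count(' ')
--         if c < m:
--             total += (m - c) * i   # retroactively lift the i earlier rows to the new minimum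
--             m = c
--         else:
--             total += c - m
--     return total
-- ===== Notes on version B (the rewrite author's own statement) =====
-- stated objective: alternative
-- what changed: Replaces A's two staged passes (build the full counts list, take min, then a conditional accumulation loop) with a single online pass that stores no list: it keeps a running minimum and a running total, retroactively adding (old_min - new_min) * rows_seen whenever the minimum drops.
import Mathlib
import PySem

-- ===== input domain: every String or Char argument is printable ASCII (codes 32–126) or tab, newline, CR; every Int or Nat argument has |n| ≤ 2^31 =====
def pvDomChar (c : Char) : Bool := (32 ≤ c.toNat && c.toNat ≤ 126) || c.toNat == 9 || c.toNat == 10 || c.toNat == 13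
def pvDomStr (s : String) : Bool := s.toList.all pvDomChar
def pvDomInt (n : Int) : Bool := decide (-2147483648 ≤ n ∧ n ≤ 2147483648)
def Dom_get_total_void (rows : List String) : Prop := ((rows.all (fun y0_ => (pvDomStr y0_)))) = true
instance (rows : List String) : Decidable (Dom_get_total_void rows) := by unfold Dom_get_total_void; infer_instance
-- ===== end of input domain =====

-- B replaces A's two staged passes (counts list, min, conditional accumulation) by a single
-- online pass keeping a running minimum and retroactively correcting the total (objective: alternative).

-- ===== PORT A =====
def get_total_void (rows : List String) : Int :=
  let counts : List Int := rows.foldl (fun cs row => cs ++ [(PySem.Str.count row " " : Int)]) []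
  match PySem.List.min? counts (fun x => x) with
  | none => 0   -- unreachable under Pre_: Python's min([]) raises ValueError
  | some min_void =>
    counts.foldl (fun total_void c => if c > min_void then total_void + (c - min_void) else total_void) 0

-- ===== PORT B =====
def get_total_void_alt (rows : List String) : Int :=
  match PySem.List.pyGet? rows 0 with
  | none => 0   -- unreachable under Pre_: rows[0] raises IndexError on []
  | some r0 =>
    ((PySem.List.enumerate rows 0).foldl
      (fun (st : Int × Int) p =>
        let c : Int := PySem.Str.count p.2 " "
        if c < st.1 then (c, st.2 + (st.1 - c) * p.1) else (st.1, st.2 + (c - st.1)))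
      ((PySem.Str.count r0 " " : Int), 0)).2

-- ===== PRECONDITION & SPEC =====
-- A raises ValueError on the empty list (min of an empty sequence); Pre_ excludes exactly that.
def Pre_get_total_void (rows : List String) : Prop := rows ≠ []
instance (rows : List String) : Decidable (Pre_get_total_void rows) := by unfold Pre_get_total_void; infer_instance
def pvWitness_get_total_void : List String := ["a b", " x "]

def Spec_get_total_void (rows : List String) (out : Int) : Prop := out = get_total_void_alt rows
instance (rows : List String) (out : Int) : Decidable (Spec_get_total_void rows out) := by unfold Spec_get_total_void; infer_instance

-- ===== CLAIM (what is proved, stated in full; the proofs are below) =====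
def Claim_equal_get_total_void : Prop := ∀ (rows : List String), Dom_get_total_void rows → Pre_get_total_void rows → Spec_get_total_void rows (get_total_void rows)

-- ===== LEMMAS AND PROOFS =====

-- A's conditional accumulation equals the closed form when m bounds every element from below.
theorem pv_foldl_closed (l : List Int) (m : Int) (h : ∀ c ∈ l, m ≤ c) (a : Int) :
    l.foldl (fun acc c => if c > m then acc + (c - m) else acc) a
      = a + l.sum - m * l.length := by
  induction l generalizing a with
  | nil => simp
  | cons c t ih =>
    have hc : m ≤ c := h c (by simp)
    have ht : ∀ x ∈ t, m ≤ x := fun x hx => h x (by simp [hx])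
    simp only [List.foldl_cons, List.sum_cons, List.length_cons]
    by_cases hcm : c > m
    · rw [if_pos hcm, ih ht]; push_cast; ring
    · have : c = m := le_antisymm (not_lt.mp hcm) hc
      rw [if_neg hcm, ih ht, this]; push_cast; ring

-- Invariant of B's single online pass: the state after scanning l from index k starting at
-- (m, t) is the running minimum together with t + sum − min·len + (m − min)·k.
theorem pv_online_inv (g : String → Int) (l : List String) (k m t : Int) :
    ((PySem.List.enumerate l k).foldl
      (fun (st : Int × Int) p =>
        let c : Int := g p.2
        if c < st.1 then (c, st.2 + (st.1 - c) * p.1) else (st.1, st.2 + (c - st.1)))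
      (m, t))
    = (l.foldl (fun a r => min a (g r)) m,
       t + (l.map g).sum - (l.foldl (fun a r => min a (g r)) m) * l.length
         + (m - l.foldl (fun a r => min a (g r)) m) * k) := by
  induction l generalizing k m t with
  | nil => simp
  | cons r rest ih =>
    rw [PySem.List.enumerate_cons]
    simp only [List.foldl_cons, List.map_cons, List.sum_cons, List.length_cons]
    by_cases h : g r < m
    · rw [if_pos h]
      have hmin : min m (g r) = g r := min_eq_right (le_of_lt h)
      rw [hmin, ih]
      push_cast; ring
    · rw [if_neg h]
      have hmin : min m (g r) = m := min_eq_left (not_lt.mp h)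
      rw [hmin, ih]
      push_cast; ring

-- ===== VERDICT (by name: the statement is the Claim_ definition above) =====
theorem get_total_void_spec : Claim_equal_get_total_void := by
  intro rows _hdom hpre
  obtain ⟨r0, rest, rfl⟩ : ∃ r0 rest, rows = r0 :: rest := by
    cases rows with
    | nil => exact absurd rfl hpre
    | cons a b => exact ⟨a, b, rfl⟩
  unfold Spec_get_total_void get_total_void get_total_void_alt
  -- A side: counts list is the map
  have hfold : (r0 :: rest).foldl (fun cs row => cs ++ [(PySem.Str.count row " " : Int)]) []
      = (r0 :: rest).map (fun row => (PySem.Str.count row " " : Int)) := by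
    simpa using PySem.List.foldl_append_singleton_eq_map (l := r0 :: rest)
      (f := fun row => (PySem.Str.count row " " : Int)) (acc := [])
  simp only [hfold]
  set g : String → Int := fun row => (PySem.Str.count row " " : Int) with hg
  set M : Int := (rest.map g).foldl min (g r0) with hM
  have hmin : PySem.List.min? ((r0 :: rest).map g) (fun x => x) = some M := by
    rw [List.map_cons, PySem.List.min?_id_cons]
  have hget : PySem.List.pyGet? (r0 :: rest) 0 = some r0 := by simp [PySem.List.pyGet?, PySem.List.pyIdx?]
  rw [hmin, hget]
  dsimp only
  have hbound : ∀ c ∈ (r0 :: rest).map g, M ≤ c :=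
    fun c hc => PySem.List.min?_isMin hmin c hc
  rw [pv_foldl_closed _ M hbound 0, pv_online_inv g (r0 :: rest) 0 (g r0) 0]
  have hMeq : (r0 :: rest).foldl (fun a r => min a (g r)) (g r0) = M := by
    rw [List.foldl_cons, min_self, hM, ← List.foldl_map (f := g) (g := min)]
  rw [hMeq]
  simp
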